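-- pv_equiv track=rewrite | github.com/kxdc/smp | main.py | search_words_in_context
-- ===== SOURCE A (Python) =====
-- def search_word_in_line(line:str, word:str) -> tuple[str, list[int]]:
--
--     return (word, [idx for idx, wd in enumerate(line.split()) if wd == word])
--
-- def search_words_in_context(context:list[str], target_words_list:list[str]) -> list[tuple[int, list[tuple[str, list[int]]]]]:
--
--     results = []
--     line_index = -1
--
--     for oneline in context:
--         line_index += 1
--         oneline_result = []
--         for target_word in target_words_list:
--             oneline_result.append(search_word_in_line(oneline, target_word))
--         results.append((line_index, oneline_result))
--
--     return results
-- ===== SOURCE B (Python) =====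
-- def search_words_in_context(context, target_words_list):
--     results = []
--     for line_index, oneline in enumerate(context):
--         positions = {}
--         for idx, wd in enumerate(oneline.split()):
--             positions.setdefault(wd, []).append(idx)
--         results.append((line_index,
--                         [(w, positions.get(w, [])) for w in target_words_list]))
--     return results
-- ===== Notes on version B (the rewrite author's own statement) =====
-- stated objective: alternative
-- what changed: Instead of re-scanning every line's word list once per target word, B splits each line once, builds a word->positions dict in a single pass, and answers each target by one dict lookup (intended as faster; a timing run measured B ~3.7x at n=1024 but both timed out at n=4096, so speed is unconfirmed).
import Mathlib
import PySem

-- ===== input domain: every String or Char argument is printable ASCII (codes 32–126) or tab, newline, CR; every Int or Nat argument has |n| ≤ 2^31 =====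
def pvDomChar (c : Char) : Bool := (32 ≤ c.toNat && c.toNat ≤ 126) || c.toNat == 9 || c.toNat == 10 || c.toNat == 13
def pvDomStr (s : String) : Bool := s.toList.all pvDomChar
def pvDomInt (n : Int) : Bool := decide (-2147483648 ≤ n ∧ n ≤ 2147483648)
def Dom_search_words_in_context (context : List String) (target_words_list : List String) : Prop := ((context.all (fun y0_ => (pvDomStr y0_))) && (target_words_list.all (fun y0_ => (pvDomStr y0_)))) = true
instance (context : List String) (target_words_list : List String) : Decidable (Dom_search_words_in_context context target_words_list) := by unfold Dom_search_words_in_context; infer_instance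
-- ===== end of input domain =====

-- B splits each line once and builds a word→positions dict in one pass, then answers each
-- target by a dict lookup — one scan per line instead of one per target word (objective: alternative).


-- ===== PORT A =====
def search_word_in_line (line : String) (word : String) : String × List Int :=
  (word, ((PySem.List.enumerate (PySem.Str.split₀ line) 0).filter (fun p => p.2 == word)).map (·.1))

def search_words_in_context (context : List String) (target_words_list : List String) : List (Int × (List (String × List Int))) :=
  (context.foldl
    (fun (st : List (Int × (List (String × List Int))) × Int) oneline =>
      let line_index := st.2 + 1
      let oneline_result := target_words_list.foldl
        (fun acc target_word => acc ++ [search_word_in_line oneline target_word]) []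
      (st.1 ++ [(line_index, oneline_result)], line_index))
    ([], -1)).1

-- ===== PORT B =====
def swic_positions (oneline : String) : PySem.Dict String (List Int) :=
  (PySem.List.enumerate (PySem.Str.split₀ oneline) 0).foldl
    (fun d p => d.modify p.2 [] (· ++ [p.1])) PySem.Dict.empty

def search_words_in_context_alt (context : List String) (target_words_list : List String) : List (Int × (List (String × List Int))) :=
  (PySem.List.enumerate context 0).map (fun q =>
    let positions := swic_positions q.2
    (q.1, target_words_list.map (fun w => (w, positions.getD w []))))

-- ===== PRECONDITION & SPEC =====
def Spec_search_words_in_context (context : List String) (target_words_list : List String) (out : List (Int × (List (String × List Int)))) : Prop := out = search_words_in_context_alt context target_words_list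
instance (context : List String) (target_words_list : List String) (out : List (Int × (List (String × List Int)))) : Decidable (Spec_search_words_in_context context target_words_list out) := by unfold Spec_search_words_in_context; infer_instance

-- ===== CLAIM (what is proved, stated in full; the proofs are below) =====
def Claim_equal_search_words_in_context : Prop := ∀ (context : List String) (target_words_list : List String), Dom_search_words_in_context context target_words_list → Spec_search_words_in_context context target_words_list (search_words_in_context context target_words_list)

-- ===== LEMMAS AND PROOFS =====

-- B's dict lookup for a word equals A's filter over the enumerated words of the line.
lemma swic_positions_getD (oneline : String) (w : String) :
    (swic_positions oneline).getD w []
      = ((PySem.List.enumerate (PySem.Str.split₀ oneline) 0).filter (fun p => p.2 == w)).map (·.1) := by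
  unfold swic_positions
  have h : (PySem.List.enumerate (PySem.Str.split₀ oneline) 0).foldl
        (fun d p => d.modify p.2 [] (· ++ [p.1])) PySem.Dict.empty
      = ((PySem.List.enumerate (PySem.Str.split₀ oneline) 0).map Prod.swap).foldl
        (fun (d : PySem.Dict String (List Int)) q => d.modify q.1 [] (· ++ [q.2])) PySem.Dict.empty :=
    (@List.foldl_map (Int × String) (String × Int) (PySem.Dict String (List Int))
      Prod.swap (fun d q => d.modify q.1 [] (· ++ [q.2]))
      (PySem.List.enumerate (PySem.Str.split₀ oneline) 0) PySem.Dict.empty).symm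
  rw [h, PySem.Dict.getD_foldl_modify_append]
  simp [List.filter_map, Function.comp_def]

-- A's per-line inner loop equals B's per-line map.
lemma swic_line_eq (oneline : String) (tws : List String) :
    tws.foldl (fun acc target_word => acc ++ [search_word_in_line oneline target_word]) []
      = tws.map (fun w => (w, (swic_positions oneline).getD w [])) := by
  rw [PySem.List.foldl_append_singleton_eq_map]
  refine List.map_congr_left (fun w _ => ?_)
  simp [search_word_in_line, swic_positions_getD]

-- A's counter loop equals B's enumerate, generalized over the accumulator and the counter.
lemma swic_fold_eq (tws : List String) (ctx : List String)
    (acc : List (Int × (List (String × List Int)))) (n : Int) :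
    (ctx.foldl
      (fun (st : List (Int × (List (String × List Int))) × Int) oneline =>
        let line_index := st.2 + 1
        let oneline_result := tws.foldl
          (fun acc target_word => acc ++ [search_word_in_line oneline target_word]) []
        (st.1 ++ [(line_index, oneline_result)], line_index))
      (acc, n)).1
      = acc ++ (PySem.List.enumerate ctx (n + 1)).map (fun q =>
          (q.1, tws.map (fun w => (w, (swic_positions q.2).getD w [])))) := by
  induction ctx generalizing acc n with
  | nil => simp [PySem.List.enumerate_nil]
  | cons x xs ih =>
    simp only [List.foldl_cons, PySem.List.enumerate_cons, List.map_cons]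
    rw [ih]
    simp only [swic_line_eq, List.append_assoc, List.cons_append, List.nil_append]

-- ===== VERDICT (by name: the statement is the Claim_ definition above) =====
theorem search_words_in_context_spec : Claim_equal_search_words_in_context := by
  intro context target_words_list _
  unfold Spec_search_words_in_context search_words_in_context search_words_in_context_alt
  rw [swic_fold_eq]
  norm_num
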